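-- pv_equiv track=rewrite | github.com/pypi-data/pypi-mirror-330 | packages/si-seqfs-da/si_seqfs_da-1.1.tar.gz/si_seqfs_da-1.1/si_seqfs_da/overconditioningBS.py | differen
-- ===== SOURCE A (Python) =====
-- def differen(a, b):
--     c1 = None
--     c2 = None
--     for i in a:
--         if i not in b:
--             c1 = i
--     for i in b:
--         if i not in a:
--             c2 = i
--     return c1, c2
-- ===== SOURCE B (Python) =====
-- def differen(a, b):
--     def last_absent(xs, other):
--         # index pass: element -> position of its last occurrence
--         last = {}
--         for i, x in enumerate(xs):
--             last[x] = i
--         others = set(other)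
--         # argmax over the index: absent key with the greatest last position
--         best, best_i = None, -1
--         for x, i in last.items():
--             if x not in others and best_i < i:
--                 best, best_i = x, i
--         return best
--     return last_absent(a, b), last_absent(b, a)
-- ===== Notes on version B (the rewrite author's own statement) =====
-- stated objective: faster
-- what changed: Replaces A's two quadratic overwrite scans by, per list, a one-pass hash index of each element's last position plus a set of the other list, then an argmax over the index's items picking the absent key with the greatest position.
import Mathlib
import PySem

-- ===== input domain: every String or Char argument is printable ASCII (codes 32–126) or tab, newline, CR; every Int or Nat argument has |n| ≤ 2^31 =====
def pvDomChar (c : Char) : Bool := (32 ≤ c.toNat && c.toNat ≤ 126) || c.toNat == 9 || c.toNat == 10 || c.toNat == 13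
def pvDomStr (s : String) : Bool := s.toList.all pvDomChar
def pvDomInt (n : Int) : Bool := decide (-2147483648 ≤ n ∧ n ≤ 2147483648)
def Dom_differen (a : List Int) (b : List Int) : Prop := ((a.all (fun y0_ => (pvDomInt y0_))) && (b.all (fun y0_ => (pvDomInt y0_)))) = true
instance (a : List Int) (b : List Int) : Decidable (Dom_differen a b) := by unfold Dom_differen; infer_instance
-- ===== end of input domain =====

-- B replaces A's quadratic overwrite loops by a last-occurrence hash index (element -> last
-- position) followed by an argmax over the index's items; proved to return the same pair.

-- ===== PORT A =====
-- A: c1/c2 start as None and get overwritten by each element absent from the other list.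
def differen (a : List Int) (b : List Int) : List (Option Int) :=
  let c1 := a.foldl (fun c i => if !b.contains i then some i else c) none
  let c2 := b.foldl (fun c i => if !a.contains i then some i else c) none
  [c1, c2]

-- ===== PORT B =====
-- B helper: dict of last positions, then pick the absent key with the greatest position.
def pvLastAbsent (xs other : List Int) : Option Int :=
  let last := (PySem.List.enumerate xs).foldl
      (fun (d : PySem.Dict Int Int) p => d.insert p.2 p.1) PySem.Dict.empty
  let others := PySem.Set.ofList other
  let r := last.items.foldl
      (fun (acc : Option Int × Int) q =>
        if !(PySem.Set.contains others q.1) && decide (acc.2 < q.2) then (some q.1, q.2) else acc)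
      (none, -1)
  r.1

def differen_alt (a : List Int) (b : List Int) : List (Option Int) :=
  [pvLastAbsent a b, pvLastAbsent b a]

-- ===== PRECONDITION & SPEC =====
def Spec_differen (a : List Int) (b : List Int) (out : List (Option Int)) : Prop := out = differen_alt a b
instance (a : List Int) (b : List Int) (out : List (Option Int)) : Decidable (Spec_differen a b out) := by unfold Spec_differen; infer_instance

-- ===== CLAIM (what is proved, stated in full; the proofs are below) =====
def Claim_equal_differen : Prop := ∀ (a : List Int) (b : List Int), Dom_differen a b → Spec_differen a b (differen a b)

-- ===== LEMMAS AND PROOFS =====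

-- abbreviations used only by the proofs
def pvLastIdx (xs : List Int) : PySem.Dict Int Int :=
  (PySem.List.enumerate xs).foldl (fun d p => d.insert p.2 p.1) PySem.Dict.empty

def pvStep (p : Int → Bool) (acc : Option Int × Int) (q : Int × Int) : Option Int × Int :=
  if p q.1 && decide (acc.2 < q.2) then (some q.1, q.2) else acc

-- A's overwrite loop ends at the last p-element, i.e. the first one of the reversed list.
theorem pv_fold_last (p : Int → Bool) (l : List Int) (c : Option Int) :
    l.foldl (fun acc i => if p i then some i else acc) c = (l.reverse.find? p).or c := by
  induction l generalizing c with
  | nil => simp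
  | cons i l ih =>
      simp only [List.foldl_cons, ih, List.reverse_cons, List.find?_append]
      cases h : p i <;> simp [List.find?, h]

theorem pv_lastIdx_append (xs : List Int) (x : Int) :
    pvLastIdx (xs ++ [x]) = (pvLastIdx xs).insert x (xs.length : Int) := by
  simp [pvLastIdx, PySem.List.enumerate_append, List.foldl_append]

theorem pv_lastIdx_nodup (xs : List Int) : (pvLastIdx xs).keys.Nodup := by
  exact PySem.Dict.nodup_keys_foldl_insert_key (PySem.List.enumerate xs) (·.2) (fun _ p => p.1)
    PySem.Dict.empty (by simp)

theorem pv_lastIdx_bound (xs : List Int) :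
    ∀ q ∈ (pvLastIdx xs).items, 0 ≤ q.2 ∧ q.2 < (xs.length : Int) := by
  induction xs using List.reverseRecOn with
  | nil => intro q hq; simp [pvLastIdx, PySem.Dict.empty] at hq
  | append_singleton xs x ih =>
      intro q hq
      rw [pv_lastIdx_append] at hq
      rcases (PySem.Dict.mem_items_insert _ _ _ _).1 hq with h | ⟨h, _⟩
      · subst h; simp
      · have := ih q h; simp at this ⊢; omega

-- the argmax fold ignores items whose key fails p
theorem pv_fold_skip (p : Int → Bool) (x : Int) (hx : p x = false) (n : Int)
    (L : List (Int × Int)) (acc : Option Int × Int) :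
    (L.map (fun q => if q.1 == x then (x, n) else q)).foldl (pvStep p) acc
      = L.foldl (pvStep p) acc := by
  induction L generalizing acc with
  | nil => rfl
  | cons q L ih =>
      simp only [List.map_cons, List.foldl_cons]
      by_cases h : q.1 = x
      · rw [if_pos (by simp [h]), show pvStep p acc (x, n) = acc from by simp [pvStep, hx],
          show pvStep p acc q = acc from by simp [pvStep, h, hx], ih]
      · rw [if_neg (by simp [h]), ih]

-- once the accumulator holds the strict maximum value, the fold is constant
theorem pv_fold_const (p : Int → Bool) (n : Int) (o : Option Int)
    (L : List (Int × Int)) (hL : ∀ q ∈ L, q.2 < n) :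
    L.foldl (pvStep p) (o, n) = (o, n) := by
  induction L with
  | nil => rfl
  | cons q L ih =>
      have hq := hL q (by simp)
      have : pvStep p (o, n) q = (o, n) := by simp [pvStep]; omega
      simp only [List.foldl_cons, this]
      exact ih (fun q hq' => hL q (by simp [hq']))

-- below the bound, the accumulator's value stays below the bound
theorem pv_fold_lt (p : Int → Bool) (n : Int)
    (L : List (Int × Int)) (hL : ∀ q ∈ L, q.2 < n) (acc : Option Int × Int)
    (hacc : acc.2 < n) : (L.foldl (pvStep p) acc).2 < n := by
  induction L generalizing acc with
  | nil => exact hacc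
  | cons q L ih =>
      have hq := hL q (by simp)
      have h2 : (pvStep p acc q).2 < n := by
        unfold pvStep; split <;> simp_all
      exact ih (fun q hq' => hL q (by simp [hq'])) _ h2

-- the argmax over the last-position index is the first absent element of the reversed list
theorem pv_pick_eq (p : Int → Bool) (xs : List Int) :
    ((pvLastIdx xs).items.foldl (pvStep p) (none, -1)).1 = xs.reverse.find? p := by
  induction xs using List.reverseRecOn with
  | nil => simp [pvLastIdx, PySem.Dict.empty]
  | append_singleton xs x ih =>
      have hbound := pv_lastIdx_bound xs
      have hnodup := pv_lastIdx_nodup xs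
      rw [pv_lastIdx_append, List.reverse_append, List.reverse_singleton,
        List.singleton_append, List.find?_cons]
      cases hx : p x with
      | false =>
          rw [PySem.Dict.items_insert]
          split
          · rw [pv_fold_skip p x hx]; exact ih
          · rw [List.foldl_append]
            have : pvStep p ((pvLastIdx xs).items.foldl (pvStep p) (none, -1)) (x, (xs.length : Int))
                = (pvLastIdx xs).items.foldl (pvStep p) (none, -1) := by
              simp [pvStep, hx]
            simp only [List.foldl_cons, List.foldl_nil, this]
            exact ih
      | true =>
          -- the new item (x, |xs|) strictly dominates every other value; the fold returns it
          have hmem : (x, (xs.length : Int)) ∈ ((pvLastIdx xs).insert x (xs.length : Int)).items :=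
            PySem.Dict.mem_items_insert_self _ _ _
          obtain ⟨L1, L2, hsplit⟩ := List.append_of_mem hmem
          have hnodup' : ((pvLastIdx xs).insert x (xs.length : Int)).keys.Nodup :=
            PySem.Dict.nodup_keys_insert _ _ _ hnodup
          have hkeys : (((pvLastIdx xs).insert x (xs.length : Int)).items.map (·.1)).Nodup := by
            simpa [PySem.Dict.keys] using hnodup'
          rw [hsplit] at hkeys
          have hother : ∀ q ∈ L1 ++ L2, q.2 < (xs.length : Int) := by
            intro q hq
            have hq' : q ∈ ((pvLastIdx xs).insert x (xs.length : Int)).items := by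
              rw [hsplit]; rcases List.mem_append.1 hq with h | h
              · exact List.mem_append.2 (Or.inl h)
              · exact List.mem_append.2 (Or.inr (List.mem_cons_of_mem _ h))
            rcases (PySem.Dict.mem_items_insert _ _ _ _).1 hq' with h | ⟨h, hne⟩
            · -- q = (x, |xs|): impossible, its key x occurs once, at the middle position
              exfalso
              subst h
              simp only [List.map_append, List.map_cons] at hkeys
              rcases List.mem_append.1 hq with h1 | h2
              · exact (List.nodup_append.1 hkeys).2.2 x (List.mem_map.2 ⟨_, h1, rfl⟩)
                  x List.mem_cons_self rfl
              · exact (List.nodup_cons.1 (List.nodup_append.1 hkeys).2.1).1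
                  (List.mem_map.2 ⟨_, h2, rfl⟩)
            · exact (hbound q h).2
          rw [hsplit, List.foldl_append, List.foldl_cons]
          have h1 : (L1.foldl (pvStep p) (none, -1)).2 < (xs.length : Int) :=
            pv_fold_lt p _ L1 (fun q hq => hother q (List.mem_append.2 (Or.inl hq))) _
              (by simp; omega)
          have h2 : pvStep p (L1.foldl (pvStep p) (none, -1)) (x, (xs.length : Int))
              = (some x, (xs.length : Int)) := by
            simp [pvStep, hx]; omega
          rw [h2, pv_fold_const p _ _ L2 (fun q hq => hother q (List.mem_append.2 (Or.inr hq)))]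

theorem pv_set_contains (b : List Int) (x : Int) :
    PySem.Set.contains (PySem.Set.ofList b) x = b.contains x := by
  simp [PySem.Set.contains]

theorem pv_lastAbsent_eq (xs other : List Int) :
    pvLastAbsent xs other = xs.reverse.find? (fun x => !other.contains x) := by
  unfold pvLastAbsent
  simp only [pv_set_contains]
  exact pv_pick_eq (fun x => !other.contains x) xs

-- ===== VERDICT (by name: the statement is the Claim_ definition above) =====
theorem differen_spec : Claim_equal_differen := by
  intro a b _
  unfold Spec_differen differen differen_alt
  rw [pv_fold_last, pv_fold_last, pv_lastAbsent_eq, pv_lastAbsent_eq]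
  simp only [Option.or_none]
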